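-- pv_equiv track=rewrite | github.com/Dysk1ddy/swordcoast | dnd_game/ui/kivy_markup.py | visible_markup_length
-- ===== SOURCE A (Python) =====
-- def visible_markup_length(markup: str) -> int:
--     visible = 0
--     position = 0
--     while position < len(markup):
--         if markup[position] == "[":
--             end = markup.find("]", position)
--             if end != -1:
--                 position = end + 1
--                 continue
--         if markup[position] == "&":
--             end = markup.find(";", position)
--             if end != -1:
--                 visible += 1
--                 position = end + 1
--                 continue
--         visible += 1
--         position += 1
--     return visible
-- ===== SOURCE B (Python) =====
-- def visible_markup_length(markup: str) -> int:
--     # Precompute, right-to-left, the next occurrence of "]" and ";" at or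
--     # after each index, then make a single scan using those tables (no
--     # substring searches in the loop).
--     n = len(markup)
--     next_br = [n] * (n + 1)
--     next_sc = [n] * (n + 1)
--     for i in range(n - 1, -1, -1):
--         next_br[i] = i if markup[i] == "]" else next_br[i + 1]
--         next_sc[i] = i if markup[i] == ";" else next_sc[i + 1]
--     visible = 0
--     i = 0
--     while i < n:
--         c = markup[i]
--         if c == "[" and next_br[i] < n:
--             i = next_br[i] + 1
--         elif c == "&" and next_sc[i] < n:
--             visible += 1
--             i = next_sc[i] + 1
--         else:
--             visible += 1
--             i += 1
--     return visible
-- ===== Notes on version B (the rewrite author's own statement) =====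
-- stated objective: alternative
-- what changed: A repeatedly calls str.find inside its scan loop; B instead precomputes, in one right-to-left pass, a next-occurrence table for each of the two closing delimiters and then makes a single scan with table lookups and no substring searches.
import Mathlib
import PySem

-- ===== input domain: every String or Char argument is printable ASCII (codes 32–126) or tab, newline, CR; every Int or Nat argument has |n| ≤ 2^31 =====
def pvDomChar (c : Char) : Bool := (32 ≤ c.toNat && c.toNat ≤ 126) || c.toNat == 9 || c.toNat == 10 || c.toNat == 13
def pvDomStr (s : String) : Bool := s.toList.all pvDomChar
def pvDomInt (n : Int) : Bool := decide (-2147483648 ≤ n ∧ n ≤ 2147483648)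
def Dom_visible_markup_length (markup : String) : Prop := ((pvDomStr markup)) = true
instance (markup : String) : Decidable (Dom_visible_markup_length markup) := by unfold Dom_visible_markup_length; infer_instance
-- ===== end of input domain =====

-- B replaces A's repeated str.find calls by two right-to-left next-occurrence
-- tables plus one scan with table lookups; objective: alternative algorithm.

-- ===== PORT A =====
-- A's while-loop: position strictly increases each iteration, so fuel = len+1 is
-- never exhausted; markup[position] is accessed only under the guard position < len.
-- markup.find(sub, position) is PySem.Chars.findFrom on the character list.
def aLoop (cs : List Char) : Nat → Int → Nat → Int
  | 0, visible, _ => visible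
  | fuel + 1, visible, position =>
    if h : position < cs.length then
      if cs[position] = '[' ∧ PySem.Chars.findFrom cs [']'] (position : Int) ≠ -1 then
        aLoop cs fuel visible ((PySem.Chars.findFrom cs [']'] (position : Int)).toNat + 1)
      else if cs[position] = '&' ∧ PySem.Chars.findFrom cs [';'] (position : Int) ≠ -1 then
        aLoop cs fuel (visible + 1) ((PySem.Chars.findFrom cs [';'] (position : Int)).toNat + 1)
      else
        aLoop cs fuel (visible + 1) (position + 1)
    else visible

def visible_markup_length (markup : String) : Int :=
  aLoop markup.toList (markup.toList.length + 1) 0 0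

-- ===== PORT B =====
-- buildNext t cs i n: the table entry for absolute index i, i+1, …: the smallest
-- absolute index ≥ that position holding t, or n if none (B's right-to-left fill).
def buildNext (t : Char) (cs : List Char) (i n : Nat) : List Nat :=
  match cs with
  | [] => [n]
  | c :: rest =>
    let tab := buildNext t rest (i + 1) n
    (if c = t then i else tab.headD n) :: tab

-- B's single scan using the two tables; i strictly increases, fuel = len+1 suffices.
def bLoop (cs : List Char) (br sc : List Nat) (n : Nat) : Nat → Int → Nat → Int
  | 0, visible, _ => visible
  | fuel + 1, visible, i =>
    if h : i < cs.length then
      if cs[i] = '[' ∧ br.getD i n < n then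
        bLoop cs br sc n fuel visible (br.getD i n + 1)
      else if cs[i] = '&' ∧ sc.getD i n < n then
        bLoop cs br sc n fuel (visible + 1) (sc.getD i n + 1)
      else
        bLoop cs br sc n fuel (visible + 1) (i + 1)
    else visible

def visible_markup_length_alt (markup : String) : Int :=
  let cs := markup.toList
  let n := cs.length
  bLoop cs (buildNext ']' cs 0 n) (buildNext ';' cs 0 n) n (n + 1) 0 0

-- ===== PRECONDITION & SPEC =====
def Spec_visible_markup_length (markup : String) (out : Int) : Prop := out = visible_markup_length_alt markup
instance (markup : String) (out : Int) : Decidable (Spec_visible_markup_length markup out) := by unfold Spec_visible_markup_length; infer_instance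

-- ===== CLAIM (what is proved, stated in full; the proofs are below) =====
def Claim_equal_visible_markup_length : Prop := ∀ (markup : String), Dom_visible_markup_length markup → Spec_visible_markup_length markup (visible_markup_length markup)

-- ===== LEMMAS AND PROOFS =====

theorem singleton_prefix_iff (t : Char) (l : List Char) : [t] <+: l ↔ l.head? = some t := by
  cases l with
  | nil => simp
  | cons c rest =>
    constructor
    · rintro ⟨u, hu⟩
      simp only [List.singleton_append] at hu
      injection hu with h1 _
      simp [h1]
    · intro h
      simp only [List.head?_cons, Option.some.injEq] at h
      exact ⟨rest, by simp [h]⟩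

-- PySem.Chars.find on a singleton needle is first-index search.
theorem find_singleton_eq (t : Char) (l : List Char) :
    PySem.Chars.find l [t] = match l.findIdx? (· = t) with
                             | some j => (j : Int)
                             | none => -1 := by
  cases hF : l.findIdx? (· = t) with
  | none =>
    have hmem : t ∉ l := by
      intro hm
      have := List.findIdx?_eq_none_iff.mp hF t hm
      simp at this
    have : ¬ [t] <:+: l := by
      rw [List.singleton_infix_iff]; exact hmem
    simpa using (PySem.Chars.find_eq_neg_one_iff l [t]).mpr this
  | some j =>
    rcases List.findIdx?_eq_some_iff_getElem.mp hF with ⟨hj, hpj, hmin⟩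
    have hpj' : l[j] = t := by simpa using hpj
    have hmem : t ∈ l := hpj' ▸ List.getElem_mem hj
    have hpos : 0 ≤ PySem.Chars.find l [t] :=
      (PySem.Chars.find_nonneg_iff l [t]).mpr ((List.singleton_infix_iff t l).mpr hmem)
    rcases PySem.Chars.find_spec hpos with ⟨hpre, hminA⟩
    set k := (PySem.Chars.find l [t]).toNat with hk
    have hkj : k = j := by
      have hhead : (l.drop k).head? = some t := (singleton_prefix_iff t _).mp hpre
      have hget : l[k]? = some t := by rw [← List.head?_drop]; exact hhead
      have hkl : k < l.length := by
        by_contra hge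
        rw [List.getElem?_eq_none (Nat.le_of_not_lt hge)] at hget
        simp at hget
      have hlk : l[k] = t := by
        rw [List.getElem?_eq_getElem hkl] at hget
        simpa using hget
      rcases Nat.lt_trichotomy k j with h | h | h
      · exact absurd (by simp [hlk] : (decide (l[k] = t)) = true) (by simpa using hmin k h)
      · exact h
      · exfalso
        apply hminA j h
        rw [singleton_prefix_iff, List.head?_drop]
        simp [List.getElem?_eq_getElem hj, hpj']
    have : PySem.Chars.find l [t] = (k : Int) := by omega
    simp [this, hkj]

-- buildNext computes, at offset k, the absolute index of the first t in cs.drop k (or n).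
theorem buildNext_getD (t : Char) (cs : List Char) (i n k : Nat) (hk : k ≤ cs.length) :
    (buildNext t cs i n).getD k n =
      match (cs.drop k).findIdx? (· = t) with
      | some j => i + k + j
      | none => n := by
  induction cs generalizing i k with
  | nil =>
    have : k = 0 := Nat.le_zero.mp hk
    subst this
    simp [buildNext]
  | cons c rest ih =>
    cases k with
    | zero =>
      simp only [buildNext, List.drop_zero, List.getD_cons_zero, List.findIdx?_cons]
      by_cases hc : c = t
      · simp [hc]
      · have hhead : (buildNext t rest (i + 1) n).headD n = (buildNext t rest (i + 1) n).getD 0 n := by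
          cases buildNext t rest (i + 1) n <;> simp
        have hrec := ih (i + 1) 0 (Nat.zero_le _)
        simp only [List.drop_zero] at hrec
        rw [if_neg hc, hhead, hrec]
        cases h : rest.findIdx? (· = t) with
        | none => simp [hc]
        | some j => simp [hc]; ring
    | succ k' =>
      have hk' : k' ≤ rest.length := by simpa using hk
      have hrec := ih (i + 1) k' hk'
      simp only [buildNext, List.getD_cons_succ, List.drop_succ_cons, hrec]
      cases h : (rest.drop k').findIdx? (· = t) <;> simp <;> omega

-- The bridge at one position: A's findFrom vs B's table lookup.
theorem bridge (t : Char) (cs : List Char) (i : Nat) (hi : i < cs.length) :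
    (PySem.Chars.findFrom cs [t] (i : Int) ≠ -1 ↔ (buildNext t cs 0 cs.length).getD i cs.length < cs.length)
    ∧ (PySem.Chars.findFrom cs [t] (i : Int) ≠ -1 →
        (PySem.Chars.findFrom cs [t] (i : Int)).toNat = (buildNext t cs 0 cs.length).getD i cs.length) := by
  have hff := PySem.Chars.findFrom_natCast cs [t] i (Nat.le_of_lt hi)
  have htab := buildNext_getD t cs 0 cs.length i (Nat.le_of_lt hi)
  rw [find_singleton_eq] at hff
  cases h : (cs.drop i).findIdx? (· = t) with
  | none =>
    rw [h] at hff htab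
    simp at hff
    constructor
    · rw [hff, htab]; simp
    · intro hne; rw [hff] at hne; simp at hne
  | some j =>
    rw [h] at hff htab
    simp only at hff htab
    have hjne : (j : Int) ≠ -1 := by omega
    rw [if_neg hjne] at hff
    rcases List.findIdx?_eq_some_iff_getElem.mp h with ⟨hjlt, -, -⟩
    have hj' : j < cs.length - i := by simpa using hjlt
    have hlen : 0 + i + j < cs.length := by omega
    have hge : (0 : Int) ≤ (i : Int) + (j : Int) :=
      add_nonneg (Int.natCast_nonneg i) (Int.natCast_nonneg j)
    have h2 : ((i : Int) + (j : Int)).toNat = i + j := by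
      rw [← Nat.cast_add, Int.toNat_natCast]
    constructor
    · rw [hff, htab]
      constructor
      · intro _; exact hlen
      · intro _ hEq; rw [hEq] at hge; norm_num at hge
    · intro _
      rw [hff, htab, h2]
      simp

-- The two scans agree step for step.
theorem loop_eq (cs : List Char) (fuel : Nat) (visible : Int) (i : Nat) :
    aLoop cs fuel visible i =
      bLoop cs (buildNext ']' cs 0 cs.length) (buildNext ';' cs 0 cs.length) cs.length fuel visible i := by
  induction fuel generalizing visible i with
  | zero => rfl
  | succ fuel ih =>
    by_cases h : i < cs.length
    · have hbr := bridge ']' cs i h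
      have hsc := bridge ';' cs i h
      rw [aLoop, bLoop]
      simp only [dif_pos h]
      by_cases hbrC : cs[i] = '[' ∧ PySem.Chars.findFrom cs [']'] (i : Int) ≠ -1
      · rw [if_pos hbrC, if_pos ⟨hbrC.1, (hbr.1.mp hbrC.2)⟩, hbr.2 hbrC.2, ih]
      · have hBneg : ¬ (cs[i] = '[' ∧ (buildNext ']' cs 0 cs.length).getD i cs.length < cs.length) :=
          fun hc => hbrC ⟨hc.1, hbr.1.mpr hc.2⟩
        rw [if_neg hbrC, if_neg hBneg]
        by_cases hscC : cs[i] = '&' ∧ PySem.Chars.findFrom cs [';'] (i : Int) ≠ -1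
        · rw [if_pos hscC, if_pos ⟨hscC.1, (hsc.1.mp hscC.2)⟩, hsc.2 hscC.2, ih]
        · have hSneg : ¬ (cs[i] = '&' ∧ (buildNext ';' cs 0 cs.length).getD i cs.length < cs.length) :=
            fun hc => hscC ⟨hc.1, hsc.1.mpr hc.2⟩
          rw [if_neg hscC, if_neg hSneg, ih]
    · rw [aLoop, bLoop]
      simp [h]

-- ===== VERDICT (by name: the statement is the Claim_ definition above) =====
theorem visible_markup_length_spec : Claim_equal_visible_markup_length := by
  intro markup _
  unfold Spec_visible_markup_length visible_markup_length visible_markup_length_alt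
  exact loop_eq markup.toList (markup.toList.length + 1) 0 0
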